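-- pv_equiv track=rewrite | github.com/adelkhatra-bit/trading-auto | bridge/mt5_bridge.py | filter_symbols
-- ===== SOURCE A (Python) =====
-- def filter_symbols(symbols, query):
--     if not query:
--         return symbols[:200]  # Cap at 200 if no query
--     q = query.upper()
--     # Score and sort
--     scored = []
--     for s in symbols:
--         n = s["name"].upper()
--         d = s.get("description", "").upper()
--         score = 0
--         if n == q: score = 100
--         elif n.startswith(q): score = 80
--         elif q in n: score = 60
--         elif q in d: score = 30
--         if score > 0:
--             scored.append((score, s))
--     scored.sort(key=lambda x: -x[0])
--     return [s for _, s in scored[:20]]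
-- ===== SOURCE B (Python) =====
-- def filter_symbols(symbols, query):
--     if not query:
--         return symbols[:200]  # Cap at 200 if no query
--     q = query.upper()
--     # One O(n) pass into fixed priority buckets instead of collecting and sorting:
--     # appending in iteration order and concatenating high-to-low reproduces the
--     # stable sort's tie order exactly.
--     b100, b80, b60, b30 = [], [], [], []
--     for s in symbols:
--         n = s["name"].upper()
--         d = s.get("description", "").upper()
--         if n == q:
--             b100.append(s)
--         elif n.startswith(q):
--             b80.append(s)
--         elif q in n:
--             b60.append(s)
--         elif q in d:
--             b30.append(s)
--     return (b100 + b80 + b60 + b30)[:20]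
-- ===== Notes on version B (the rewrite author's own statement) =====
-- stated objective: faster
-- what changed: Replaces A's collect-(score,symbol)-then-stable-sort-then-slice with a single pass that appends each matching symbol to one of four fixed priority buckets (100/80/60/30) and concatenates them high-to-low before taking 20, eliminating the sort.
import Mathlib
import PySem

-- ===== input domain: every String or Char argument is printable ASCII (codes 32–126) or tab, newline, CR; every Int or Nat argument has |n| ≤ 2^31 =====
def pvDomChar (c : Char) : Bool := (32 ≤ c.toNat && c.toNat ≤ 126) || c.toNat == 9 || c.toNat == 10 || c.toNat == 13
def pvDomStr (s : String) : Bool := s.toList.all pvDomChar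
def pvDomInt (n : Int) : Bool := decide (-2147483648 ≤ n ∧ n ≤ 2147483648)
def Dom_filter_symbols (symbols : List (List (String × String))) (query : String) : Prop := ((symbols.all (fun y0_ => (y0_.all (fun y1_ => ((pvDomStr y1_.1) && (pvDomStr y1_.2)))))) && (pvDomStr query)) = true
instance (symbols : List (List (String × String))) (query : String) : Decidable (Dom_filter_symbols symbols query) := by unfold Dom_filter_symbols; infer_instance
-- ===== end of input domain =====

-- B replaces A's collect-(score,symbol)-then-stable-sort with one bucket pass over the
-- four fixed priority levels, concatenated high-to-low; return values proved equal on Pre_.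

-- first-match association-list lookup = s.get(k, dflt); exact for Python dicts.
-- (s["name"] is ported with default "" — exact only under Pre_, which guarantees the key.)
def pvDictGetD : List (String × String) → String → String → String
  | [], _, dflt => dflt
  | (k, v) :: rest, key, dflt => if k = key then v else pvDictGetD rest key dflt

-- ===== PORT A =====
def filter_symbols (symbols : List (List (String × String))) (query : String) : List (List (String × String)) :=
  if query = "" then PySem.List.slice symbols none (some 200)
  else
    let q := PySem.Str.upper query
    let scored := symbols.foldl (fun scored s =>
      let n := PySem.Str.upper (pvDictGetD s "name" "")
      let d := PySem.Str.upper (pvDictGetD s "description" "")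
      let score : Int :=
        if n = q then 100
        else if PySem.Str.startswith n q then 80
        else if PySem.Str.isIn q n then 60
        else if PySem.Str.isIn q d then 30
        else 0
      if score > 0 then scored ++ [(score, s)] else scored) ([] : List (Int × List (String × String)))
    (PySem.List.slice (PySem.List.sorted scored (fun x => -x.1)) none (some 20)).map (fun x => x.2)

-- ===== PORT B =====
def filter_symbols_alt (symbols : List (List (String × String))) (query : String) : List (List (String × String)) :=
  if query = "" then symbols.take 200
  else
    let q := PySem.Str.upper query
    let b := symbols.foldl (fun (b : List (List (String × String)) × List (List (String × String)) × List (List (String × String)) × List (List (String × String))) s =>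
      let n := PySem.Str.upper (pvDictGetD s "name" "")
      let d := PySem.Str.upper (pvDictGetD s "description" "")
      if n = q then (b.1 ++ [s], b.2.1, b.2.2.1, b.2.2.2)
      else if PySem.Str.startswith n q then (b.1, b.2.1 ++ [s], b.2.2.1, b.2.2.2)
      else if PySem.Str.isIn q n then (b.1, b.2.1, b.2.2.1 ++ [s], b.2.2.2)
      else if PySem.Str.isIn q d then (b.1, b.2.1, b.2.2.1, b.2.2.2 ++ [s])
      else b) (([], [], [], []))
    (b.1 ++ b.2.1 ++ b.2.2.1 ++ b.2.2.2).take 20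

-- ===== PRECONDITION & SPEC =====
-- Pre_ excludes only inputs where the Python A raises KeyError: a nonempty query with
-- some symbol dict lacking the "name" key (B's Python raises there too).
def Pre_filter_symbols (symbols : List (List (String × String))) (query : String) : Prop :=
  query = "" ∨ ∀ s ∈ symbols, "name" ∈ s.map Prod.fst
instance (symbols : List (List (String × String))) (query : String) : Decidable (Pre_filter_symbols symbols query) := by unfold Pre_filter_symbols; infer_instance

def pvWitness_filter_symbols : (List (List (String × String))) × String :=
  ([[("name", "EURUSD"), ("description", "Euro vs Dollar")], [("name", "XAUUSD")]], "eur")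

def Spec_filter_symbols (symbols : List (List (String × String))) (query : String) (out : List (List (String × String))) : Prop := out = filter_symbols_alt symbols query
instance (symbols : List (List (String × String))) (query : String) (out : List (List (String × String))) : Decidable (Spec_filter_symbols symbols query out) := by unfold Spec_filter_symbols; infer_instance

-- ===== CLAIM (what is proved, stated in full; the proofs are below) =====
def Claim_equal_filter_symbols : Prop := ∀ (symbols : List (List (String × String))) (query : String), Dom_filter_symbols symbols query → Pre_filter_symbols symbols query → Spec_filter_symbols symbols query (filter_symbols symbols query)

-- ===== LEMMAS AND PROOFS =====

-- the score A computes for one symbol (proof-side abbreviation of the inlined code)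
def pvScore (q : String) (s : List (String × String)) : Int :=
  if PySem.Str.upper (pvDictGetD s "name" "") = q then 100
  else if PySem.Str.startswith (PySem.Str.upper (pvDictGetD s "name" "")) q then 80
  else if PySem.Str.isIn q (PySem.Str.upper (pvDictGetD s "name" "")) then 60
  else if PySem.Str.isIn q (PySem.Str.upper (pvDictGetD s "description" "")) then 30
  else 0

lemma insertBy_append_not_before {α : Type} (before : α → α → Bool) (x : α) (as bs : List α)
    (h : ∀ y ∈ as, before x y = false) :
    PySem.List.insertBy before x (as ++ bs) = as ++ PySem.List.insertBy before x bs := by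
  induction as with
  | nil => rfl
  | cons a t ih =>
      simp only [List.cons_append, PySem.List.insertBy, h a (by simp)]
      simp only [ih (fun y hy => h y (by simp [hy])), Bool.false_eq_true, if_false]

lemma insertBy_all_before {α : Type} (before : α → α → Bool) (x : α) (bs : List α)
    (h : ∀ y ∈ bs, before x y = true) :
    PySem.List.insertBy before x bs = x :: bs := by
  cases bs with
  | nil => rfl
  | cons b t => simp [PySem.List.insertBy, h b (by simp)]

-- stable sort by -score of a list whose scores all lie in {100, 80, 60, 30} is
-- exactly the concatenation of the score groups in original order, high to low
lemma sorted_groups {α : Type} (l : List (Int × α))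
    (h : ∀ x ∈ l, x.1 = 100 ∨ x.1 = 80 ∨ x.1 = 60 ∨ x.1 = 30) :
    PySem.List.sorted l (fun x => -x.1) =
      l.filter (fun x => x.1 == 100) ++ l.filter (fun x => x.1 == 80) ++
      l.filter (fun x => x.1 == 60) ++ l.filter (fun x => x.1 == 30) := by
  rw [PySem.List.sorted_eq_foldl_insertBy]
  induction l using List.reverseRecOn with
  | nil => rfl
  | append_singleton l x ih =>
      have hl : ∀ y ∈ l, y.1 = 100 ∨ y.1 = 80 ∨ y.1 = 60 ∨ y.1 = 30 :=
        fun y hy => h y (by simp [hy])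
      rw [List.foldl_append, List.foldl_cons, List.foldl_nil, ih hl,
         List.append_assoc, List.append_assoc]
      have hx := h x (by simp)
      have m100 : ∀ y ∈ l.filter (fun x => x.1 == 100), y.1 = (100 : Int) := by
        intro y hy; simpa using (List.mem_filter.mp hy).2
      have m80 : ∀ y ∈ l.filter (fun x => x.1 == 80), y.1 = (80 : Int) := by
        intro y hy; simpa using (List.mem_filter.mp hy).2
      have m60 : ∀ y ∈ l.filter (fun x => x.1 == 60), y.1 = (60 : Int) := by
        intro y hy; simpa using (List.mem_filter.mp hy).2
      have m30 : ∀ y ∈ l.filter (fun x => x.1 == 30), y.1 = (30 : Int) := by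
        intro y hy; simpa using (List.mem_filter.mp hy).2
      rcases hx with hx | hx | hx | hx
      · rw [insertBy_append_not_before _ _ _ _
              (by intro y hy; have := m100 y hy; simp; omega),
            insertBy_all_before _ _ _
              (by intro y hy
                  simp only [List.mem_append] at hy
                  rcases hy with hy | hy | hy
                  · have := m80 y hy; simp; omega
                  · have := m60 y hy; simp; omega
                  · have := m30 y hy; simp; omega)]
        simp [List.filter_append, hx]
      · rw [insertBy_append_not_before _ _ _ _
              (by intro y hy; have := m100 y hy; simp; omega),
            insertBy_append_not_before _ _ _ _
              (by intro y hy; have := m80 y hy; simp; omega),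
            insertBy_all_before _ _ _
              (by intro y hy
                  simp only [List.mem_append] at hy
                  rcases hy with hy | hy
                  · have := m60 y hy; simp; omega
                  · have := m30 y hy; simp; omega)]
        simp [List.filter_append, hx]
      · rw [insertBy_append_not_before _ _ _ _
              (by intro y hy; have := m100 y hy; simp; omega),
            insertBy_append_not_before _ _ _ _
              (by intro y hy; have := m80 y hy; simp; omega),
            insertBy_append_not_before _ _ _ _
              (by intro y hy; have := m60 y hy; simp; omega),
            insertBy_all_before _ _ _
              (by intro y hy; have := m30 y hy; simp; omega)]
        simp [List.filter_append, hx]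
      · rw [PySem.List.insertBy_of_forall_not_before _ _ _
              (by intro y hy
                  simp only [List.mem_append] at hy
                  rcases hy with hy | hy | hy | hy
                  · have := m100 y hy; simp; omega
                  · have := m80 y hy; simp; omega
                  · have := m60 y hy; simp; omega
                  · have := m30 y hy; simp; omega)]
        simp [List.filter_append, hx]

-- B's bucket pass computed in closed form
lemma buckets_eq (q : String) (l : List (List (String × String)))
    (b : List (List (String × String)) × List (List (String × String)) × List (List (String × String)) × List (List (String × String))) :
    l.foldl (fun b s =>
      let n := PySem.Str.upper (pvDictGetD s "name" "")
      let d := PySem.Str.upper (pvDictGetD s "description" "")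
      if n = q then (b.1 ++ [s], b.2.1, b.2.2.1, b.2.2.2)
      else if PySem.Str.startswith n q then (b.1, b.2.1 ++ [s], b.2.2.1, b.2.2.2)
      else if PySem.Str.isIn q n then (b.1, b.2.1, b.2.2.1 ++ [s], b.2.2.2)
      else if PySem.Str.isIn q d then (b.1, b.2.1, b.2.2.1, b.2.2.2 ++ [s])
      else b) b =
    (b.1 ++ l.filter (fun s => pvScore q s == 100),
     b.2.1 ++ l.filter (fun s => pvScore q s == 80),
     b.2.2.1 ++ l.filter (fun s => pvScore q s == 60),
     b.2.2.2 ++ l.filter (fun s => pvScore q s == 30)) := by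
  induction l generalizing b with
  | nil => simp
  | cons s t ih =>
      rw [List.foldl_cons]
      simp only []
      by_cases h1 : PySem.Str.upper (pvDictGetD s "name" "") = q
      · have hs : pvScore q s = (100 : Int) := by unfold pvScore; rw [if_pos h1]
        simp only [h1, if_true]
        rw [ih]
        simp [hs]
      · by_cases h2 : PySem.Str.startswith (PySem.Str.upper (pvDictGetD s "name" "")) q = true
        · have hs : pvScore q s = (80 : Int) := by unfold pvScore; rw [if_neg h1, if_pos h2]
          simp only [h1, if_false, h2, if_true]
          rw [ih]
          simp [hs]
        · by_cases h3 : PySem.Str.isIn q (PySem.Str.upper (pvDictGetD s "name" "")) = true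
          · have hs : pvScore q s = (60 : Int) := by unfold pvScore; rw [if_neg h1, if_neg h2, if_pos h3]
            simp only [h1, if_false, h2, h3, if_true]
            rw [ih]
            simp [hs]
          · by_cases h4 : PySem.Str.isIn q (PySem.Str.upper (pvDictGetD s "description" "")) = true
            · have hs : pvScore q s = (30 : Int) := by unfold pvScore; rw [if_neg h1, if_neg h2, if_neg h3, if_pos h4]
              simp only [h1, if_false, h2, h3, h4, if_true]
              rw [ih]
              simp [hs]
            · have hs : pvScore q s = (0 : Int) := by unfold pvScore; rw [if_neg h1, if_neg h2, if_neg h3, if_neg h4]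
              simp only [h1, if_false, h2, h3, h4]
              rw [ih]
              simp [hs]

lemma pvScore_cases (q : String) (s : List (String × String)) :
    pvScore q s = 100 ∨ pvScore q s = 80 ∨ pvScore q s = 60 ∨ pvScore q s = 30 ∨ pvScore q s = 0 := by
  unfold pvScore; split_ifs <;> simp

-- A's scoring pass computed in closed form
lemma scored_eq (q : String) (l : List (List (String × String)))
    (acc : List (Int × List (String × String))) :
    l.foldl (fun scored s =>
      let n := PySem.Str.upper (pvDictGetD s "name" "")
      let d := PySem.Str.upper (pvDictGetD s "description" "")
      let score : Int :=
        if n = q then 100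
        else if PySem.Str.startswith n q then 80
        else if PySem.Str.isIn q n then 60
        else if PySem.Str.isIn q d then 30
        else 0
      if score > 0 then scored ++ [(score, s)] else scored) acc =
    acc ++ (l.filter (fun s => pvScore q s > 0)).map (fun s => (pvScore q s, s)) := by
  induction l generalizing acc with
  | nil => simp
  | cons s t ih =>
      rw [List.foldl_cons]
      show List.foldl _ (if pvScore q s > 0 then acc ++ [(pvScore q s, s)] else acc) t = _
      by_cases hp : pvScore q s > 0
      · rw [if_pos hp, ih]
        simp [hp]
      · rw [if_neg hp, ih]
        simp [hp]

lemma filter_score_eq (q : String) (l : List (List (String × String))) (v : Int) (hv : 0 < v) :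
    ((l.filter (fun s => pvScore q s > 0)).map (fun s => ((pvScore q s : Int), s))).filter
        (fun x => x.1 == v) =
      (l.filter (fun s => pvScore q s == v)).map (fun s => ((pvScore q s : Int), s)) := by
  rw [List.filter_map, List.filter_filter]
  congr 1
  apply List.filter_congr
  intro s _
  by_cases h : pvScore q s = v
  · simp [h, hv]
  · simp [h]

-- ===== VERDICT (by name: the statement is the Claim_ definition above) =====
theorem filter_symbols_spec : Claim_equal_filter_symbols := by
  intro symbols query _ _
  show filter_symbols symbols query = filter_symbols_alt symbols query
  unfold filter_symbols filter_symbols_alt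
  by_cases hq : query = ""
  · rw [if_pos hq, if_pos hq, PySem.List.slice_to _ (by norm_num : (0:Int) ≤ 200)]
    simp
  · rw [if_neg hq, if_neg hq]
    simp only [scored_eq, buckets_eq, List.nil_append]
    rw [sorted_groups _ (by
      intro x hx
      simp only [List.mem_map, List.mem_filter] at hx
      obtain ⟨s, ⟨_, hp⟩, rfl⟩ := hx
      simp only [decide_eq_true_eq] at hp
      rcases pvScore_cases (PySem.Str.upper query) s with h | h | h | h | h <;> simp [h]; omega)]
    rw [PySem.List.slice_to _ (by norm_num : (0:Int) ≤ 20)]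
    rw [filter_score_eq _ _ _ (by norm_num), filter_score_eq _ _ _ (by norm_num),
        filter_score_eq _ _ _ (by norm_num), filter_score_eq _ _ _ (by norm_num)]
    simp [List.map_take, List.map_map, Function.comp_def]
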